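-- pv_equiv track=rewrite | github.com/AlexStahlman/itsc3155module1-2 | scripts/script_3.py | get_string_letter
-- ===== SOURCE A (Python) =====
-- def get_string_letter(impu):
--     dict1 = {}
--     for c in impu.lower():
--         if c.isalpha():
--             if c in dict1:
--                 dict1[c] += 1
--             else:
--                 dict1[c] = 1
--     return dict1
-- ===== SOURCE B (Python) =====
-- def get_string_letter(impu):
--     s = impu.lower()
--     return {c: s.count(c) for c in dict.fromkeys(s) if c.isalpha()}
-- ===== Notes on version B (the rewrite author's own statement) =====
-- stated objective: idiomatic
-- what changed: Replaces A's single per-character accumulation pass with per-branch dict updates by a dict comprehension over the distinct characters (dict.fromkeys, first-occurrence order), counting each letter with one str.count re-scan of the lowered string.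
import Mathlib
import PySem

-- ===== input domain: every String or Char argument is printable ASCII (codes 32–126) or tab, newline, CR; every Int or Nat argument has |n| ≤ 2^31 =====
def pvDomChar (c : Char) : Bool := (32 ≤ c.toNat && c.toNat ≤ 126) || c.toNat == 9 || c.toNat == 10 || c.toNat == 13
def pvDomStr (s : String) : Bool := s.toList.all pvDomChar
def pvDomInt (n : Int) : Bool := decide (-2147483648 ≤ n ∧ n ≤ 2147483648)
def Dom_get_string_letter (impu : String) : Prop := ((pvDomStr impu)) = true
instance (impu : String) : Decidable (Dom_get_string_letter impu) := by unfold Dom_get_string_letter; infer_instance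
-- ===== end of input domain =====

-- B replaces A's single accumulation pass with a dict comprehension over the distinct
-- characters (first-occurrence order) that counts each letter with str.count (idiomatic).

-- ===== PORT A =====
def get_string_letter (impu : String) : List (String × Int) :=
  (List.foldl
    (fun (dict1 : PySem.Dict String Int) (c : Char) =>
      if PySem.Chars.strIsalpha [c] then
        match PySem.Dict.get? dict1 (String.ofList [c]) with
        | some v => PySem.Dict.insert dict1 (String.ofList [c]) (v + 1)
        | none   => PySem.Dict.insert dict1 (String.ofList [c]) 1
      else dict1)
    PySem.Dict.empty ((PySem.Str.lower impu).toList)).items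

-- ===== PORT B =====
def get_string_letter_alt (impu : String) : List (String × Int) :=
  ((PySem.List.dedup (PySem.Str.lower impu).toList).filter
      (fun c => PySem.Chars.strIsalpha [c])).map
    (fun c => (String.ofList [c],
      ((PySem.Chars.count (PySem.Str.lower impu).toList [c] : Nat) : Int)))

-- ===== PRECONDITION & SPEC =====
def Spec_get_string_letter (impu : String) (out : List (String × Int)) : Prop := out = get_string_letter_alt impu
instance (impu : String) (out : List (String × Int)) : Decidable (Spec_get_string_letter impu out) := by unfold Spec_get_string_letter; infer_instance

-- ===== CLAIM (what is proved, stated in full; the proofs are below) =====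
def Claim_equal_get_string_letter : Prop := ∀ (impu : String), Dom_get_string_letter impu → Spec_get_string_letter impu (get_string_letter impu)

-- ===== LEMMAS AND PROOFS =====

-- single-character strings are injective images of their character
theorem pvMkInj {a b : Char} : String.ofList [a] = String.ofList [b] ↔ a = b := by
  constructor
  · intro h; have := congrArg String.toList h; simpa using this
  · intro h; rw [h]

theorem pvMkBeq (a b : Char) : (String.ofList [a] == String.ofList [b]) = decide (a = b) := by
  by_cases h : a = b
  · simp [h]
  · simp [h, pvMkInj]

-- counting a single-character substring is counting the character
theorem pvCountGo (c : Char) (l : List Char) : ∀ (fuel acc : Nat), l.length ≤ fuel →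
    PySem.Chars.count.go [c] fuel l acc = acc + l.count c := by
  induction l with
  | nil => intro fuel acc _; cases fuel <;> simp [PySem.Chars.count.go]
  | cons a t ih =>
    intro fuel acc hf
    cases fuel with
    | zero => simp at hf
    | succ n =>
      simp only [PySem.Chars.count.go]
      by_cases h : a = c
      · simp [h, List.isPrefixOf, ih n (acc + 1) (by simpa using hf)]
        omega
      · have hpre : ([c].isPrefixOf (a :: t)) = false := by
          simp [List.isPrefixOf, Ne.symm h]
        simp [hpre, h, ih n acc (by simpa using hf)]

theorem pvCountSingleton (s : List Char) (c : Char) :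
    PySem.Chars.count s [c] = s.count c := by
  simp [PySem.Chars.count, pvCountGo c s s.length 0 le_rfl]

-- PySem.Set.ofList of a snoc
theorem pvOfListAppend (xs : List Char) (x : Char) :
    PySem.Set.ofList (xs ++ [x]) =
      if x ∈ xs then PySem.Set.ofList xs else PySem.Set.ofList xs ++ [x] := by
  have h : PySem.Set.ofList (xs ++ [x]) = PySem.Set.add (PySem.Set.ofList xs) x := by
    simp [PySem.Set.ofList, List.foldl_append]
  rw [h]
  have hc : (PySem.Set.ofList xs).contains x = decide (x ∈ xs) := by
    simp [PySem.Set.contains, PySem.Set.mem_ofList]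
  by_cases hm : x ∈ xs <;> simp [PySem.Set.add, hm]

-- dedup commutes with filter
theorem pvOfListFilter (q : Char → Bool) (xs : List Char) :
    PySem.Set.ofList (xs.filter q) = (PySem.Set.ofList xs).filter q := by
  induction xs using List.reverseRecOn with
  | nil => rfl
  | append_singleton p x ih =>
    rw [List.filter_append, List.filter_singleton, pvOfListAppend]
    by_cases hm : x ∈ p
    · rw [if_pos hm]
      by_cases hq : q x
      · rw [hq, cond_true, pvOfListAppend, if_pos (List.mem_filter.2 ⟨hm, hq⟩), ih]
      · rw [Bool.not_eq_true] at hq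
        rw [hq, cond_false, List.append_nil, ih]
    · rw [if_neg hm, List.filter_append, List.filter_singleton, ← ih]
      by_cases hq : q x
      · rw [hq, cond_true, pvOfListAppend,
          if_neg (fun h => hm (List.mem_filter.1 h).1)]
      · rw [Bool.not_eq_true] at hq
        rw [hq, cond_false, List.append_nil, List.append_nil]

-- the shape of the dict A maintains: keys in order, values given by a count function
def pvMap (cnt : Char → Int) (l : List Char) : List (String × Int) :=
  l.map (fun c => (String.ofList [c], cnt c))

theorem pvFindMem (cnt : Char → Int) (l : List Char) (c : Char) (h : c ∈ l) :
    List.find? (fun p => p.1 == String.ofList [c]) (pvMap cnt l)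
      = some (String.ofList [c], cnt c) := by
  induction l with
  | nil => simp at h
  | cons a t ih =>
    by_cases hac : a = c
    · subst hac; simp [pvMap]
    · have hct : c ∈ t := by
        cases h with
        | head => exact absurd rfl hac
        | tail _ h => exact h
      simp only [pvMap, List.map_cons, List.find?_cons, pvMkBeq, hac, decide_false]
      exact ih hct

theorem pvGetMem (cnt : Char → Int) (l : List Char) (c : Char)
    (d : PySem.Dict String Int) (hd : d.items = pvMap cnt l) (h : c ∈ l) :
    PySem.Dict.get? d (String.ofList [c]) = some (cnt c) := by
  rw [PySem.Dict.get?, hd, pvFindMem cnt l c h]; rfl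

theorem pvGetNone (cnt : Char → Int) (l : List Char) (c : Char)
    (d : PySem.Dict String Int) (hd : d.items = pvMap cnt l) (h : c ∉ l) :
    PySem.Dict.get? d (String.ofList [c]) = none := by
  rw [PySem.Dict.get?, hd]
  have hno : ∀ p ∈ pvMap cnt l, ¬ (p.1 == String.ofList [c]) = true := by
    intro p hp
    obtain ⟨x, hx, rfl⟩ := List.mem_map.1 hp
    simp only [pvMkBeq, decide_eq_true_eq]
    rintro rfl; exact h hx
  rw [List.find?_eq_none.2 hno]; rfl

theorem pvContains (cnt : Char → Int) (l : List Char) (c : Char)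
    (d : PySem.Dict String Int) (hd : d.items = pvMap cnt l) :
    PySem.Dict.contains d (String.ofList [c]) = decide (c ∈ l) := by
  rw [PySem.Dict.contains, hd]
  by_cases h : c ∈ l
  · simp only [h, decide_true]
    exact List.any_eq_true.2 ⟨_, List.mem_map.2 ⟨c, h, rfl⟩, by simp⟩
  · simp only [h, decide_false]
    refine List.any_eq_false.2 ?_
    intro p hp
    obtain ⟨x, hx, rfl⟩ := List.mem_map.1 hp
    simp only [pvMkBeq, decide_eq_true_eq]
    rintro rfl; exact h hx

theorem pvInsertMem (cnt : Char → Int) (l : List Char) (c : Char) (v : Int)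
    (d : PySem.Dict String Int) (hd : d.items = pvMap cnt l) (h : c ∈ l) :
    (PySem.Dict.insert d (String.ofList [c]) v).items
      = pvMap (fun c' => if c' = c then v else cnt c') l := by
  rw [PySem.Dict.insert, if_pos (by rw [pvContains cnt l c d hd]; simpa using h), hd]
  simp only [pvMap, List.map_map]
  refine List.map_congr_left ?_
  intro x _
  by_cases hx : x = c
  · simp [Function.comp, hx]
  · simp [Function.comp, pvMkBeq, hx]

theorem pvInsertNew (cnt : Char → Int) (l : List Char) (c : Char) (v : Int)
    (d : PySem.Dict String Int) (hd : d.items = pvMap cnt l) (h : c ∉ l) :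
    (PySem.Dict.insert d (String.ofList [c]) v).items
      = pvMap cnt l ++ [(String.ofList [c], v)] := by
  rw [PySem.Dict.insert, if_neg (by rw [pvContains cnt l c d hd]; simpa using h), hd]

def pvCnt (p : List Char) (c : Char) : Int := ((p.count c : Nat) : Int)

-- A's loop body, named for the invariant proof (definitionally equal to the port's lambda)
def pvStep (q : Char → Bool) (dict1 : PySem.Dict String Int) (c : Char) :
    PySem.Dict String Int :=
  if q c then
    match PySem.Dict.get? dict1 (String.ofList [c]) with
    | some v => PySem.Dict.insert dict1 (String.ofList [c]) (v + 1)
    | none   => PySem.Dict.insert dict1 (String.ofList [c]) 1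
  else dict1

-- loop invariant for A's accumulation pass
theorem pvInv (q : Char → Bool) (p : List Char) :
    (List.foldl (pvStep q) PySem.Dict.empty p).items
    = pvMap (pvCnt p) (PySem.Set.ofList (p.filter q)) := by
  induction p using List.reverseRecOn with
  | nil => rfl
  | append_singleton p c ih =>
    rw [List.foldl_append, List.foldl_cons, List.foldl_nil]
    have hcnt : ∀ x, x ≠ c → pvCnt (p ++ [c]) x = pvCnt p x := by
      intro x hx
      simp [pvCnt, List.count_append, Ne.symm hx]
    have hcntc : pvCnt (p ++ [c]) c = pvCnt p c + 1 := by
      simp [pvCnt, List.count_append]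
    by_cases hq : q c
    · rw [List.filter_append, List.filter_singleton, hq, cond_true, pvOfListAppend]
      by_cases hm : c ∈ p.filter q
      · -- letter seen before: its entry is updated in place
        have hmo : c ∈ PySem.Set.ofList (p.filter q) := (PySem.Set.mem_ofList _ _).2 hm
        rw [if_pos hm, pvStep, if_pos hq,
          pvGetMem (pvCnt p) _ c _ ih hmo,
          pvInsertMem (pvCnt p) _ c _ _ ih hmo]
        refine List.map_congr_left ?_
        intro x _
        by_cases hx : x = c
        · subst hx; simp [hcntc]
        · simp [hx, hcnt x hx]
      · -- new letter: appended at the end with count 1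
        have hcp : c ∉ p := fun h => hm (List.mem_filter.2 ⟨h, hq⟩)
        have hmo : c ∉ PySem.Set.ofList (p.filter q) := fun h =>
          hm ((PySem.Set.mem_ofList _ _).1 h)
        rw [if_neg hm, pvStep, if_pos hq,
          pvGetNone (pvCnt p) _ c _ ih hmo,
          pvInsertNew (pvCnt p) _ c _ _ ih hmo]
        rw [pvMap, pvMap, List.map_append, List.map_singleton]
        congr 1
        · refine List.map_congr_left ?_
          intro x hx
          have hxp : x ∈ p := (List.mem_filter.1 ((PySem.Set.mem_ofList _ _).1 hx)).1
          have hxc : x ≠ c := fun h => hcp (h ▸ hxp)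
          simp [hcnt x hxc]
        · have h1 : pvCnt (p ++ [c]) c = 1 := by
            simp [pvCnt, List.count_append, List.count_eq_zero.2 hcp]
          simp [h1]
    · -- not a letter: the dict is unchanged
      rw [Bool.not_eq_true] at hq
      rw [List.filter_append, List.filter_singleton, hq, cond_false, List.append_nil,
        pvStep, hq]
      simp only [Bool.false_eq_true, if_false, ih]
      refine List.map_congr_left ?_
      intro x hx
      have hxq : q x = true := (List.mem_filter.1 ((PySem.Set.mem_ofList _ _).1 hx)).2
      have hxc : x ≠ c := fun h => by rw [h, hq] at hxq; exact Bool.false_ne_true hxq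
      simp [hcnt x hxc]

-- ===== VERDICT (by name: the statement is the Claim_ definition above) =====
theorem get_string_letter_spec : Claim_equal_get_string_letter := by
  intro impu _
  unfold Spec_get_string_letter get_string_letter get_string_letter_alt
  rw [show (fun (dict1 : PySem.Dict String Int) (c : Char) =>
      if PySem.Chars.strIsalpha [c] then
        match PySem.Dict.get? dict1 (String.ofList [c]) with
        | some v => PySem.Dict.insert dict1 (String.ofList [c]) (v + 1)
        | none   => PySem.Dict.insert dict1 (String.ofList [c]) 1
      else dict1) = pvStep (fun c => PySem.Chars.strIsalpha [c]) from rfl]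
  rw [pvInv (fun c => PySem.Chars.strIsalpha [c]) ((PySem.Str.lower impu).toList)]
  rw [PySem.List.dedup, ← pvOfListFilter]
  refine List.map_congr_left ?_
  intro x _
  simp [pvCnt, pvCountSingleton]
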